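-- pv_equiv track=rewrite | github.com/SysFate/SysISTD | SysISTD/AnnalyseRecord.py | extact_data_barcode
-- ===== SOURCE A (Python) =====
-- def extact_data_barcode(numberXBC,numberYBC,XBC,YBC,strand): #record
--     if numberXBC == 1 and numberYBC == 1:
--         for BCX,strandsX in XBC.items():
--             for strandX, seqX in strandsX.items(): #coordinateX
--                 for BCY,strandsY in YBC.items():
--                     for strandY, seqY in strandsY.items(): #coordinateY
--                         # Ici seul les barcode ayant le sens du guibson sont accepte
--                         if strandX == strand and strandY == strand:
--                             coordinateName = f'{BCX}x{BCY}'
--                             seqBC = {"x": seqX,"y": seqY} # str(record[coordinateX[0]:coordinateX[1]].seq) str(record[coordinateY[0]:coordinateY[1]].seq)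
--                             return 1,seqBC,coordinateName
--         return 2,None,None
--     elif numberXBC == 0 and numberYBC == 0:
--         return 4,None,None
--     elif numberXBC > 1 and numberYBC > 1:
--         return 12,None,None
--     elif numberXBC > 1:
--         return 10,None,None
--     elif numberYBC > 1:
--         return 11,None,None
--     else:
--         return 5,None,None
-- ===== SOURCE B (Python) =====
-- def extact_data_barcode(numberXBC, numberYBC, XBC, YBC, strand):
--     if numberXBC == 1 and numberYBC == 1:
--         x = next(((bc, seq) for bc, strands in XBC.items()
--                   for st, seq in strands.items() if st == strand), None)
--         y = next(((bc, seq) for bc, strands in YBC.items()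
--                   for st, seq in strands.items() if st == strand), None)
--         if x is not None and y is not None:
--             return 1, {"x": x[1], "y": y[1]}, f'{x[0]}x{y[0]}'
--         return 2, None, None
--     if numberXBC == 0 and numberYBC == 0:
--         return 4, None, None
--     if numberXBC > 1 and numberYBC > 1:
--         return 12, None, None
--     if numberXBC > 1:
--         return 10, None, None
--     if numberYBC > 1:
--         return 11, None, None
--     return 5, None, None
-- ===== Notes on version B (the rewrite author's own statement) =====
-- stated objective: alternative
-- what changed: Replaces the four-level nested scan of XBC x YBC by two independent single passes that find the first strand-matching X entry and the first strand-matching Y entry, combined at the end; worst-case cost drops from O(|X|*|Y|) to O(|X|+|Y|) but typical inputs match early, so measured time is similar.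
import Mathlib
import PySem

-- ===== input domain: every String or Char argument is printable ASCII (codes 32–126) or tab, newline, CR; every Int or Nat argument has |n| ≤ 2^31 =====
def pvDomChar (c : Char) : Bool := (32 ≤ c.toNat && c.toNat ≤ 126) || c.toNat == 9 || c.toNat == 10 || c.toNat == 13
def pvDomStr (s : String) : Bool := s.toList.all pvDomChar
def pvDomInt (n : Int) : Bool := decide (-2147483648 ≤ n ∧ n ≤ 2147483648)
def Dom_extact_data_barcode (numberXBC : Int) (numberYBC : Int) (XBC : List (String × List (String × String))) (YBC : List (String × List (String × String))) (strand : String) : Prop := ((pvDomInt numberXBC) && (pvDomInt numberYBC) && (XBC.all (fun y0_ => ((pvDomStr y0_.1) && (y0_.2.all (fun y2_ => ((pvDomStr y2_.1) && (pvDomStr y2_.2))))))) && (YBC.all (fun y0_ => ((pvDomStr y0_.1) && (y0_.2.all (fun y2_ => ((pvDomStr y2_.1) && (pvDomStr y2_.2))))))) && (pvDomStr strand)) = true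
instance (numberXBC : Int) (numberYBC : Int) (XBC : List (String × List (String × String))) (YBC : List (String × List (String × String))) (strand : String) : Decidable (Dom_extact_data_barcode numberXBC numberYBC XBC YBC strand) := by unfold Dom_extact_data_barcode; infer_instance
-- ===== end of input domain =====

-- B replaces the nested X×Y scan by two independent first-match passes over XBC and YBC.
-- ===== PORT A =====
-- innermost loop: for strandY, seqY in strandsY.items()
def pvLoopY2 (strand BCX seqX strandX BCY : String) :
    List (String × String) → Option (Int × (Option (List (String × String))) × Option String)
  | [] => none
  | (strandY, seqY) :: rest =>
    if strandX = strand ∧ strandY = strand then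
      some (1, some [("x", seqX), ("y", seqY)], some (BCX ++ "x" ++ BCY))
    else pvLoopY2 strand BCX seqX strandX BCY rest

-- for BCY, strandsY in YBC.items()
def pvLoopY1 (strand BCX seqX strandX : String) :
    List (String × List (String × String)) → Option (Int × (Option (List (String × String))) × Option String)
  | [] => none
  | (BCY, strandsY) :: rest =>
    match pvLoopY2 strand BCX seqX strandX BCY strandsY with
    | some r => some r
    | none => pvLoopY1 strand BCX seqX strandX rest

-- for strandX, seqX in strandsX.items()
def pvLoopX2 (strand BCX : String) (YBC : List (String × List (String × String))) :
    List (String × String) → Option (Int × (Option (List (String × String))) × Option String)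
  | [] => none
  | (strandX, seqX) :: rest =>
    match pvLoopY1 strand BCX seqX strandX YBC with
    | some r => some r
    | none => pvLoopX2 strand BCX YBC rest

-- for BCX, strandsX in XBC.items()
def pvLoopX1 (strand : String) (YBC : List (String × List (String × String))) :
    List (String × List (String × String)) → Option (Int × (Option (List (String × String))) × Option String)
  | [] => none
  | (BCX, strandsX) :: rest =>
    match pvLoopX2 strand BCX YBC strandsX with
    | some r => some r
    | none => pvLoopX1 strand YBC rest

def extact_data_barcode (numberXBC : Int) (numberYBC : Int) (XBC : List (String × List (String × String))) (YBC : List (String × List (String × String))) (strand : String) : Int × (Option (List (String × String))) × Option String :=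
  if numberXBC = 1 ∧ numberYBC = 1 then
    match pvLoopX1 strand YBC XBC with
    | some r => r
    | none => (2, none, none)
  else if numberXBC = 0 ∧ numberYBC = 0 then (4, none, none)
  else if numberXBC > 1 ∧ numberYBC > 1 then (12, none, none)
  else if numberXBC > 1 then (10, none, none)
  else if numberYBC > 1 then (11, none, none)
  else (5, none, none)

-- ===== PORT B =====
-- first (barcode, seq) whose strand key equals strand, scanning the list once
def pvFirstBC (strand : String) :
    List (String × List (String × String)) → Option (String × String)
  | [] => none
  | (bc, strands) :: rest =>
    match strands.find? (fun p => p.1 == strand) with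
    | some p => some (bc, p.2)
    | none => pvFirstBC strand rest

def extact_data_barcode_alt (numberXBC : Int) (numberYBC : Int) (XBC : List (String × List (String × String))) (YBC : List (String × List (String × String))) (strand : String) : Int × (Option (List (String × String))) × Option String :=
  if numberXBC = 1 ∧ numberYBC = 1 then
    match pvFirstBC strand XBC, pvFirstBC strand YBC with
    | some (bx, sx), some (by_, sy) =>
        (1, some [("x", sx), ("y", sy)], some (bx ++ "x" ++ by_))
    | _, _ => (2, none, none)
  else if numberXBC = 0 ∧ numberYBC = 0 then (4, none, none)
  else if numberXBC > 1 ∧ numberYBC > 1 then (12, none, none)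
  else if numberXBC > 1 then (10, none, none)
  else if numberYBC > 1 then (11, none, none)
  else (5, none, none)

-- ===== PRECONDITION & SPEC =====
def Spec_extact_data_barcode (numberXBC : Int) (numberYBC : Int) (XBC : List (String × List (String × String))) (YBC : List (String × List (String × String))) (strand : String) (out : Int × (Option (List (String × String))) × Option String) : Prop := out = extact_data_barcode_alt numberXBC numberYBC XBC YBC strand
instance (numberXBC : Int) (numberYBC : Int) (XBC : List (String × List (String × String))) (YBC : List (String × List (String × String))) (strand : String) (out : Int × (Option (List (String × String))) × Option String) : Decidable (Spec_extact_data_barcode numberXBC numberYBC XBC YBC strand out) := by unfold Spec_extact_data_barcode; infer_instance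

-- ===== CLAIM (what is proved, stated in full; the proofs are below) =====
def Claim_equal_extact_data_barcode : Prop := ∀ (numberXBC : Int) (numberYBC : Int) (XBC : List (String × List (String × String))) (YBC : List (String × List (String × String))) (strand : String), Dom_extact_data_barcode numberXBC numberYBC XBC YBC strand → Spec_extact_data_barcode numberXBC numberYBC XBC YBC strand (extact_data_barcode numberXBC numberYBC XBC YBC strand)

-- ===== LEMMAS AND PROOFS =====
theorem pvLoopY2_eq (strand BCX seqX strandX BCY : String) (ys : List (String × String)) :
    pvLoopY2 strand BCX seqX strandX BCY ys =
      if strandX = strand then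
        match ys.find? (fun p => p.1 == strand) with
        | some p => some ((1 : Int), some [("x", seqX), ("y", p.2)], some (BCX ++ "x" ++ BCY))
        | none => none
      else none := by
  induction ys with
  | nil => simp [pvLoopY2]
  | cons y rest ih =>
    obtain ⟨sy, qy⟩ := y
    by_cases hx : strandX = strand
    · subst hx
      by_cases hy : sy = strandX
      · simp [pvLoopY2, List.find?, hy]
      · have hb : (sy == strandX) = false := beq_eq_false_iff_ne.mpr hy
        simp [pvLoopY2, List.find?, hb, hy, ih]
    · simp [pvLoopY2, hx, ih]

theorem pvLoopY1_eq (strand BCX seqX strandX : String) (YBC : List (String × List (String × String))) :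
    pvLoopY1 strand BCX seqX strandX YBC =
      if strandX = strand then
        match pvFirstBC strand YBC with
        | some p => some ((1 : Int), some [("x", seqX), ("y", p.2)], some (BCX ++ "x" ++ p.1))
        | none => none
      else none := by
  induction YBC with
  | nil => simp [pvLoopY1, pvFirstBC]
  | cons y rest ih =>
    obtain ⟨BCY, strandsY⟩ := y
    rw [pvLoopY1, pvLoopY2_eq, pvFirstBC]
    by_cases hx : strandX = strand
    · subst hx
      cases h : strandsY.find? (fun p => p.1 == strandX) with
      | none => simp [h, ih]
      | some p => simp [h]
    · simp [hx, ih]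

theorem pvLoopX2_eq (strand BCX : String) (YBC : List (String × List (String × String)))
    (xs : List (String × String)) :
    pvLoopX2 strand BCX YBC xs =
      match xs.find? (fun p => p.1 == strand) with
      | some p =>
        (match pvFirstBC strand YBC with
         | some q => some ((1 : Int), some [("x", p.2), ("y", q.2)], some (BCX ++ "x" ++ q.1))
         | none => none)
      | none => none := by
  induction xs with
  | nil => simp [pvLoopX2]
  | cons x rest ih =>
    obtain ⟨sx, qx⟩ := x
    rw [pvLoopX2, pvLoopY1_eq]
    by_cases hx : sx = strand
    · subst hx
      cases h : pvFirstBC sx YBC with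
      | none =>
        simp [List.find?, h, ih]
        cases List.find? (fun p => p.1 == sx) rest <;> rfl
      | some q => simp [List.find?, h]
    · have hb : (sx == strand) = false := beq_eq_false_iff_ne.mpr hx
      simp [List.find?, hb, hx, ih]

theorem pvLoopX1_eq (strand : String) (YBC XBC : List (String × List (String × String))) :
    pvLoopX1 strand YBC XBC =
      match pvFirstBC strand XBC with
      | some p =>
        (match pvFirstBC strand YBC with
         | some q => some ((1 : Int), some [("x", p.2), ("y", q.2)], some (p.1 ++ "x" ++ q.1))
         | none => none)
      | none => none := by
  induction XBC with
  | nil => simp [pvLoopX1, pvFirstBC]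
  | cons x rest ih =>
    obtain ⟨BCX, strandsX⟩ := x
    rw [pvLoopX1, pvLoopX2_eq, pvFirstBC]
    cases hf : strandsX.find? (fun p => p.1 == strand) with
    | none => simp [ih]
    | some p =>
      cases hy : pvFirstBC strand YBC with
      | none =>
        simp [hy, ih]
        cases pvFirstBC strand rest <;> rfl
      | some q => simp [hy]

-- ===== VERDICT (by name: the statement is the Claim_ definition above) =====
theorem extact_data_barcode_spec : Claim_equal_extact_data_barcode := by
  intro numberXBC numberYBC XBC YBC strand _
  unfold Spec_extact_data_barcode extact_data_barcode extact_data_barcode_alt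
  by_cases h : numberXBC = 1 ∧ numberYBC = 1
  · rw [if_pos h, if_pos h, pvLoopX1_eq]
    cases hx : pvFirstBC strand XBC with
    | none => cases hy : pvFirstBC strand YBC with
      | none => rfl
      | some q => rfl
    | some p =>
      obtain ⟨bx, sx⟩ := p
      cases hy : pvFirstBC strand YBC with
      | none => rfl
      | some q => obtain ⟨b, s⟩ := q; rfl
  · rw [if_neg h, if_neg h]
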